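-- pv_equiv track=rewrite | github.com/CSCI546-26sp/final-project-no-consensus | chunkserver/varint.py | decodePositions
-- ===== SOURCE A (Python) =====
-- def decodePositions(data):
--     """Yield absolute positions from delta-varint bytes object."""
--     pos = 0
--     shift = 0
--     current = 0
--     for byte in data:
--         current |= (byte & 0x7F) << shift
--         if byte & 0x80:
--             shift += 7
--         else:
--             pos += current
--             yield pos
--             current = 0
--             shift = 0
-- ===== SOURCE B (Python) =====
-- def decodePositions(data):
--     """Return absolute positions from delta-varint bytes (list(A(data)) for the generator A).
--
--     Two separate passes instead of one fused loop: first split the byte stream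
--     into complete varint groups (a byte with the high bit clear ends a group,
--     a trailing incomplete group is dropped), then decode each group most
--     significant byte first and prefix-sum the deltas.
--     """
--     groups = []
--     buf = []
--     for byte in data:
--         buf.append(byte)
--         if not (byte & 0x80):
--             groups.append(buf)
--             buf = []
--     positions = []
--     pos = 0
--     for group in groups:
--         value = 0
--         for byte in reversed(group):
--             value = (value << 7) + (byte & 0x7F)
--         pos += value
--         positions.append(pos)
--     return positions
-- ===== Notes on version B (the rewrite author's own statement) =====
-- stated objective: alternative
-- what changed: A fuses varint reassembly (via |= and a running shift) and prefix summation into one loop over bytes; B first splits the byte stream into complete varint groups, then decodes each group most-significant-byte first by a shift-and-add fold and prefix-sums the deltas in a separate pass.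
import Mathlib
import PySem

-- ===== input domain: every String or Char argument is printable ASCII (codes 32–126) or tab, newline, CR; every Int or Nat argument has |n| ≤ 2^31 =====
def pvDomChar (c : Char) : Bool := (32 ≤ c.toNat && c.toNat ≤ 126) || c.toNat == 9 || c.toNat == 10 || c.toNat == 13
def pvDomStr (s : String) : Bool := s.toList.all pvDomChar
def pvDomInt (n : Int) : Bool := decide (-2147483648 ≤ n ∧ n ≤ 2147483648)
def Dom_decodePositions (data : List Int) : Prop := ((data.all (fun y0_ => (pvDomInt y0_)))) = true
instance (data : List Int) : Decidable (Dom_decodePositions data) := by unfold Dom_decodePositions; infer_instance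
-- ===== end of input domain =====

-- B splits the stream into varint groups first and prefix-sums in a second pass (alternative
-- decomposition, not faster); A is a Python generator, so the equivalence is about the list of
-- yielded values (list(A(data)) == B(data)).

-- ===== PORT A =====
-- one loop step of A: state (pos, shift, current, acc-of-yielded-values)
def pvStepA (st : Int × Nat × Int × List Int) (byte : Int) : Int × Nat × Int × List Int :=
  let current := PySem.Int.bor st.2.2.1 (PySem.Int.band byte 127 <<< st.2.1)
  if PySem.Int.band byte 128 ≠ 0 then
    (st.1, st.2.1 + 7, current, st.2.2.2)
  else
    (st.1 + current, 0, 0, st.2.2.2 ++ [st.1 + current])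

def decodePositions (data : List Int) : List Int :=
  (data.foldl pvStepA (0, 0, 0, [])).2.2.2

-- ===== PORT B =====
-- pass 1 step: state (groups, buf)
def pvStepB1 (st : List (List Int) × List Int) (byte : Int) : List (List Int) × List Int :=
  let buf := st.2 ++ [byte]
  if PySem.Int.band byte 128 = 0 then (st.1 ++ [buf], []) else (st.1, buf)

-- decode one group most-significant byte first (Python: for byte in reversed(group))
def pvDecodeGroup (g : List Int) : Int :=
  g.reverse.foldl (fun (v : Int) (byte : Int) => (v <<< (7:Nat)) + PySem.Int.band byte 127) (0:Int)

-- pass 2 step: state (positions, pos)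
def pvStepB2 (st : List Int × Int) (g : List Int) : List Int × Int :=
  let pos := st.2 + pvDecodeGroup g
  (st.1 ++ [pos], pos)

def decodePositions_alt (data : List Int) : List Int :=
  ((data.foldl pvStepB1 ([], [])).1.foldl pvStepB2 ([], 0)).1

-- ===== PRECONDITION & SPEC =====
def Spec_decodePositions (data : List Int) (out : List Int) : Prop := out = decodePositions_alt data
instance (data : List Int) (out : List Int) : Decidable (Spec_decodePositions data out) := by unfold Spec_decodePositions; infer_instance

-- ===== CLAIM (what is proved, stated in full; the proofs are below) =====
def Claim_equal_decodePositions : Prop := ∀ (data : List Int), Dom_decodePositions data → Spec_decodePositions data (decodePositions data)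

-- ===== LEMMAS AND PROOFS =====

-- disjoint-bit OR on ℕ: low part below 2^k, high part shifted by k
theorem pv_lor_sl : ∀ (k m n : ℕ), m < 2^k → m ||| (n <<< k) = m + n * 2^k := by
  intro k
  induction k with
  | zero => intro m n h; interval_cases m; simp [Nat.shiftLeft_eq]
  | succ k ih =>
    intro m n h
    have hb := Nat.bit_decide_mod_two_eq_one_shiftRight_one m
    have hsl : n <<< (k+1) = Nat.bit false (n <<< k) := by
      rw [Nat.shiftLeft_succ, Nat.bit_false_apply]
    have hpow : (2:ℕ)^(k+1) = 2 * 2^k := by ring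
    have h2 : m >>> 1 < 2 ^ k := by
      simp only [Nat.shiftRight_one]; omega
    conv_lhs => rw [← hb, hsl, Nat.lor_bit]
    rw [ih _ n h2]
    have hr : n * 2^(k+1) = 2 * (n * 2 ^ k) := by ring
    rw [hr]
    simp only [Nat.shiftRight_one]
    set c := n * 2 ^ k with hc
    rcases Nat.even_or_odd m with he | ho
    · have hm0 := Nat.even_iff.mp he
      have : ¬ (m % 2 = 1) := by omega
      simp only [this, decide_false, Bool.or_false, Nat.bit_false_apply]
      omega
    · have hm2 : m % 2 = 1 := Nat.odd_iff.mp ho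
      simp only [hm2, decide_true, Bool.true_or, Nat.bit_true_apply]
      omega

theorem pv_band127_nonneg (b : Int) : 0 ≤ PySem.Int.band b 127 := by
  rw [PySem.Int.band_comm]
  exact PySem.Int.band_nonneg_of_nonneg_left b (by norm_num)

theorem pv_band127_lt (b : Int) : PySem.Int.band b 127 < 128 := by
  unfold PySem.Int.band
  split_ifs with h1 h2 h2
  · have := Nat.and_le_right (n := b.toNat) (m := (127:Int).toNat)
    have h127 : (127:Int).toNat = 127 := by decide
    rw [h127] at this ⊢
    omega
  · omega
  · have h127 : (127:Int).toNat = 127 := by decide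
    rw [h127]
    omega
  · omega

-- same disjoint OR on ℤ, phrased for A's `current |= (byte & 0x7F) << shift`
theorem pv_bor_disjoint (a c : Int) (k : Nat) (ha0 : 0 ≤ a) (ha : a < 2^k) (hc : 0 ≤ c) :
    PySem.Int.bor a (c <<< k) = a + c * 2^k := by
  have hpk : (0:Int) < 2^k := by positivity
  have hsl : c <<< k = ((c.toNat * 2^k : ℕ) : Int) := by
    rw [Int.shiftLeft_eq]
    push_cast
    rw [Int.toNat_of_nonneg hc]
  have h1 : (0:Int) ≤ c <<< k := by rw [hsl]; positivity
  rw [PySem.Int.bor_of_nonneg ha0 h1, hsl]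
  have htn : ((c.toNat * 2^k : ℕ) : Int).toNat = c.toNat * 2^k := by
    exact Int.toNat_natCast _
  rw [htn]
  have hm : a.toNat < 2^k := by
    have : ((2^k : ℕ) : Int) = 2^k := by push_cast; ring
    omega
  have := pv_lor_sl k a.toNat c.toNat hm
  rw [Nat.shiftLeft_eq] at this
  rw [this]
  push_cast
  rw [Int.toNat_of_nonneg ha0, Int.toNat_of_nonneg hc]

theorem pv_zsl : ((0:Int) <<< (7:Nat)) = 0 := by decide

-- the inner decode fold is linear in its seed
theorem pv_decode_seed : ∀ (l : List Int) (v : Int),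
    l.foldl (fun (v : Int) (byte : Int) => (v <<< (7:Nat)) + PySem.Int.band byte 127) v
      = v * (128:Int) ^ l.length
        + l.foldl (fun (v : Int) (byte : Int) => (v <<< (7:Nat)) + PySem.Int.band byte 127) (0:Int) := by
  intro l
  induction l with
  | nil => intro v; simp
  | cons b l ih =>
    intro v
    simp only [List.foldl_cons, List.length_cons, pv_zsl, zero_add]
    rw [ih ((v <<< (7:Nat)) + PySem.Int.band b 127), ih (PySem.Int.band b 127)]
    simp only [Int.shiftLeft_eq]
    ring

theorem pv_decode_bounds : ∀ (l : List Int),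
    (0:Int) ≤ l.foldl (fun (v : Int) (byte : Int) => (v <<< (7:Nat)) + PySem.Int.band byte 127) (0:Int) ∧
    l.foldl (fun (v : Int) (byte : Int) => (v <<< (7:Nat)) + PySem.Int.band byte 127) (0:Int)
      < (128:Int) ^ l.length := by
  intro l
  induction l with
  | nil => simp
  | cons b l ih =>
    simp only [List.foldl_cons, List.length_cons, pv_zsl, zero_add]
    rw [pv_decode_seed l (PySem.Int.band b 127)]
    have hc0 := pv_band127_nonneg b
    have hc1 := pv_band127_lt b
    have hp : (0:Int) < 128 ^ l.length := by positivity
    constructor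
    · have h0 : 0 ≤ PySem.Int.band b 127 * 128 ^ l.length := by positivity
      omega
    · have h1 : PySem.Int.band b 127 * 128 ^ l.length ≤ 127 * 128 ^ l.length :=
        mul_le_mul_of_nonneg_right (by omega) (le_of_lt hp)
      have h2 : (128:Int) ^ (l.length + 1) = 128 * 128 ^ l.length := by ring
      omega

theorem pv_decodeGroup_nonneg (g : List Int) : 0 ≤ pvDecodeGroup g :=
  (pv_decode_bounds g.reverse).1

theorem pv_decodeGroup_lt (g : List Int) : pvDecodeGroup g < 2 ^ (7 * g.length) := by
  have := (pv_decode_bounds g.reverse).2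
  have h : (128:Int) ^ g.reverse.length = 2 ^ (7 * g.length) := by
    rw [List.length_reverse, pow_mul]
    norm_num
  rw [h] at this
  exact this

theorem pv_decodeGroup_append (buf : List Int) (b : Int) :
    pvDecodeGroup (buf ++ [b]) = pvDecodeGroup buf + PySem.Int.band b 127 * 2 ^ (7 * buf.length) := by
  unfold pvDecodeGroup
  rw [List.reverse_append]
  simp only [List.reverse_cons, List.reverse_nil, List.nil_append, List.singleton_append,
    List.foldl_cons, pv_zsl, zero_add]
  rw [pv_decode_seed buf.reverse (PySem.Int.band b 127)]
  have h : (128:Int) ^ buf.reverse.length = 2 ^ (7 * buf.length) := by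
    rw [List.length_reverse, pow_mul]
    norm_num
  rw [h]
  ring

-- A's running `current` is exactly the decode of the pending group extended by the new byte
theorem pv_current_step (buf : List Int) (b : Int) :
    PySem.Int.bor (pvDecodeGroup buf) (PySem.Int.band b 127 <<< (7 * buf.length))
      = pvDecodeGroup (buf ++ [b]) := by
  rw [pv_bor_disjoint _ _ _ (pv_decodeGroup_nonneg buf) (pv_decodeGroup_lt buf) (pv_band127_nonneg b)]
  rw [pv_decodeGroup_append]

-- pass 1 accumulates its groups on the left: the already-finished groups factor out
theorem pv_groups_factor : ∀ (data : List Int) (gs : List (List Int)) (buf : List Int),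
    data.foldl pvStepB1 (gs, buf)
      = (gs ++ (data.foldl pvStepB1 ([], buf)).1, (data.foldl pvStepB1 ([], buf)).2) := by
  intro data
  induction data with
  | nil => intro gs buf; simp
  | cons b d ih =>
    intro gs buf
    simp only [List.foldl_cons, pvStepB1]
    by_cases hb : PySem.Int.band b 128 = 0
    · simp only [hb, if_true]
      rw [ih (gs ++ [buf ++ [b]]) [], ih ([] ++ [buf ++ [b]]) []]
      simp
    · simp only [hb, if_false]
      exact ih gs (buf ++ [b])

-- the main invariant: A's fused loop = pass 1 then pass 2, for any mid-stream state
theorem pv_main : ∀ (data : List Int) (pos : Int) (buf : List Int) (acc : List Int),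
    (data.foldl pvStepA (pos, 7 * buf.length, pvDecodeGroup buf, acc)).2.2.2
      = ((data.foldl pvStepB1 ([], buf)).1.foldl pvStepB2 (acc, pos)).1 := by
  intro data
  induction data with
  | nil => intro pos buf acc; simp
  | cons b d ih =>
    intro pos buf acc
    simp only [List.foldl_cons, pvStepA, pvStepB1]
    rw [pv_current_step buf b]
    by_cases hb : PySem.Int.band b 128 = 0
    · simp only [hb, if_true, ne_eq, not_true_eq_false, if_false]
      have h0 : (0:Nat) = 7 * ([] : List Int).length := by simp
      have h0' : (0:Int) = pvDecodeGroup [] := by rfl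
      rw [h0, h0', ih (pos + pvDecodeGroup (buf ++ [b])) [] (acc ++ [pos + pvDecodeGroup (buf ++ [b])])]
      simp only [List.nil_append]
      rw [pv_groups_factor d [buf ++ [b]] []]
      simp only [List.foldl_append, List.foldl_cons, List.foldl_nil, pvStepB2]
    · simp only [hb, ne_eq, not_false_eq_true, if_true, if_false]
      have h7 : 7 * buf.length + 7 = 7 * (buf ++ [b]).length := by
        simp only [List.length_append, List.length_cons, List.length_nil]
        omega
      rw [h7]
      exact ih pos (buf ++ [b]) acc

-- ===== VERDICT (by name: the statement is the Claim_ definition above) =====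
theorem decodePositions_spec : Claim_equal_decodePositions := by
  intro data _
  unfold Spec_decodePositions decodePositions decodePositions_alt
  have h0 : (0:Nat) = 7 * ([] : List Int).length := by simp
  have h0' : (0:Int) = pvDecodeGroup [] := by rfl
  calc (data.foldl pvStepA (0, 0, 0, [])).2.2.2
      = (data.foldl pvStepA (0, 7 * ([] : List Int).length, pvDecodeGroup [], [])).2.2.2 := by
        rw [← h0, ← h0']
    _ = ((data.foldl pvStepB1 ([], [])).1.foldl pvStepB2 ([], 0)).1 := pv_main data 0 [] []
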